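-- pv_equiv track=rewrite | github.com/jiminAn/Kpop_NLP_Project | Final_Pyqt5_UI/app_ui.py | add_newline
-- ===== SOURCE A (Python) =====
-- def add_newline(lyrics):
--     cnt = 0
--     for i in range(len(lyrics)):
--         if lyrics[i] == ' ':
--             cnt += 1
--         if cnt > 5 and lyrics[i] == ' ':
--             cnt = 0
--             lyrics[i] = '\n'
--     return ''.join(lyrics)
-- ===== SOURCE B (Python) =====
-- def add_newline(lyrics):
--     spaces = [i for i, c in enumerate(lyrics) if c == ' ']
--     for j in range(5, len(spaces), 6):
--         lyrics[spaces[j]] = '\n'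
--     return ''.join(lyrics)
-- ===== Notes on version B (the rewrite author's own statement) =====
-- stated objective: alternative
-- what changed: Replaced the running space-counter single scan with a two-phase traversal: first collect all indices of ' ' elements, then overwrite every 6th collected index (stride 6 starting at 5) with a newline; B performs the same in-place mutation of the argument as A.
import Mathlib
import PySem

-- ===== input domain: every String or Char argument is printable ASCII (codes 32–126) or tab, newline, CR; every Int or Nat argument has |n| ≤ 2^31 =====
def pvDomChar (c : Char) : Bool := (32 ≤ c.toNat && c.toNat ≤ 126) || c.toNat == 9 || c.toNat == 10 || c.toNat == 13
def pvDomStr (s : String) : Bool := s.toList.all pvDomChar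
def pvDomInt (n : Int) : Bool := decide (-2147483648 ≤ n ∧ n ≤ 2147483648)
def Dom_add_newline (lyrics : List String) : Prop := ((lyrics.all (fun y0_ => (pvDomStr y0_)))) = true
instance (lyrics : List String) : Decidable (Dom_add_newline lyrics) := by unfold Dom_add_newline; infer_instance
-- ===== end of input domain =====

-- B replaces A's running space-counter scan by collecting the indices of all ' ' elements and
-- overwriting every 6th one (stride 6 from index 5) with '\n'; same in-place mutation, same result.
-- The equivalence proved is about the RETURN value; B performs the same mutation of the argument as A.

-- ===== PORT A =====
-- loop body of A: update cnt on a space, then replace with '\n' and reset when cnt > 5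
def stepA (st : Int × List String) (i : Int) : Int × List String :=
  let cnt := if PySem.List.pyGetD st.2 i "" = " " then st.1 + 1 else st.1
  if cnt > 5 ∧ PySem.List.pyGetD st.2 i "" = " " then (0, PySem.List.pySetD st.2 i "\n")
  else (cnt, st.2)

def add_newline (lyrics : List String) : String :=
  PySem.Str.join ""
    ((PySem.List.pyRange 0 (lyrics.length : Int) 1).foldl stepA (0, lyrics)).2

-- ===== PORT B =====
def add_newline_alt (lyrics : List String) : String :=
  let spaces : List Int :=
    (PySem.List.enumerate lyrics).filterMap (fun p => if p.2 = " " then some p.1 else none)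
  PySem.Str.join ""
    ((PySem.List.pyRange 5 (spaces.length : Int) 6).foldl
      (fun ls j => PySem.List.pySetD ls (PySem.List.pyGetD spaces j 0) "\n") lyrics)

-- ===== PRECONDITION & SPEC =====
def Spec_add_newline (lyrics : List String) (out : String) : Prop := out = add_newline_alt lyrics
instance (lyrics : List String) (out : String) : Decidable (Spec_add_newline lyrics out) := by unfold Spec_add_newline; infer_instance

-- ===== CLAIM (what is proved, stated in full; the proofs are below) =====
def Claim_equal_add_newline : Prop := ∀ (lyrics : List String), Dom_add_newline lyrics → Spec_add_newline lyrics (add_newline lyrics)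

-- ===== LEMMAS AND PROOFS =====

-- Structural model of A's loop: cnt-carrying scan over the list.
def goA (c : Int) : List String → List String
  | [] => []
  | x :: xs =>
    let c' := if x = " " then c + 1 else c
    if c' > 5 ∧ x = " " then "\n" :: goA 0 xs else x :: goA c' xs

-- Generalised space-index collection (B's comprehension, with an arbitrary enumerate start).
def spacesFrom (s : Int) (ls : List String) : List Int :=
  (PySem.List.enumerate ls s).filterMap (fun p => if p.2 = " " then some p.1 else none)

theorem spacesFrom_cons (s : Int) (x : String) (xs : List String) :
    spacesFrom s (x :: xs) = (if x = " " then [s] else []) ++ spacesFrom (s + 1) xs := by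
  simp only [spacesFrom, PySem.List.enumerate_cons, List.filterMap_cons]
  split_ifs <;> simp

theorem length_spacesFrom (s : Int) (ls : List String) :
    (spacesFrom s ls).length = ls.count " " := by
  induction ls generalizing s with
  | nil => simp [spacesFrom]
  | cons x xs ih =>
    rw [spacesFrom_cons]
    by_cases hx : x = " " <;> simp [hx, ih]

theorem length_goA (c : Int) (ls : List String) : (goA c ls).length = ls.length := by
  induction ls generalizing c with
  | nil => rfl
  | cons x xs ih => simp only [goA]; split_ifs <;> simp [ih]

-- A's index loop over [k, k + |ys|) acting on pre ++ ys (with |pre| = k) is goA on ys.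
theorem loopA (ys pre : List String) (c : Int) :
    ((PySem.List.pyRange (pre.length : Int) ((pre.length : Int) + (ys.length : Int)) 1).foldl
      stepA (c, pre ++ ys)).2 = pre ++ goA c ys := by
  induction ys generalizing pre c with
  | nil => rw [PySem.List.pyRange_one_eq_nil (by simp)]; simp [goA]
  | cons y ys ih =>
    rw [PySem.List.pyRange_one_cons (by push_cast [List.length_cons]; omega), List.foldl_cons]
    have hget : PySem.List.pyGetD (pre ++ y :: ys) (pre.length : Int) "" = y := by
      simp [List.getD_eq_getElem?_getD]
    have hset : PySem.List.pySetD (pre ++ y :: ys) (pre.length : Int) "\n" = pre ++ "\n" :: ys := by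
      simp [List.set_cons_zero]
    have hstep : stepA (c, pre ++ y :: ys) (pre.length : Int)
        = if (if y = " " then c + 1 else c) > 5 ∧ y = " "
          then (0, pre ++ "\n" :: ys)
          else ((if y = " " then c + 1 else c), pre ++ y :: ys) := by
      simp only [stepA, hget, hset]
    have harith : (pre.length : Int) + 1 + (ys.length : Int)
        = (pre.length : Int) + ((y :: ys).length : Int) := by
      push_cast [List.length_cons]; ring
    have hlen : ∀ v : String, ((pre ++ [v]).length : Int) = (pre.length : Int) + 1 := by
      intro v; push_cast [List.length_append, List.length_cons, List.length_nil]; ring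
    rw [hstep]
    by_cases hy : y = " "
    · by_cases hc : (c + 1) > 5
      · rw [if_pos ⟨by rw [if_pos hy]; exact hc, hy⟩]
        have h2 := ih (pre ++ ["\n"]) 0
        rw [show ((pre ++ ["\n"]) ++ ys) = pre ++ "\n" :: ys by simp, hlen, harith] at h2
        rw [h2]
        simp [goA, hy, hc]
      · rw [if_neg (by rw [if_pos hy]; exact fun h => hc h.1)]
        rw [if_pos hy]
        have h2 := ih (pre ++ [y]) (c + 1)
        rw [show ((pre ++ [y]) ++ ys) = pre ++ y :: ys by simp, hlen, harith] at h2
        rw [h2]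
        simp [goA, hy, hc]
    · rw [if_neg (fun h => hy h.2), if_neg hy]
      have h2 := ih (pre ++ [y]) c
      rw [show ((pre ++ [y]) ++ ys) = pre ++ y :: ys by simp, hlen, harith] at h2
      rw [h2]
      simp [goA, hy]

-- Pointwise value of goA: position p is turned into '\n' iff it holds a space and the
-- number of spaces seen so far (offset by c) is a multiple of 6.
theorem goA_getElem? (ls : List String) (c : Int) (hc0 : 0 ≤ c) (hc6 : c < 6)
    (p : Nat) (hp : p < ls.length) :
    (goA c ls)[p]? =
      some (if ls[p] = " " ∧ (c + ((ls.take (p + 1)).count " " : Int)) % 6 = 0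
            then "\n" else ls[p]) := by
  induction ls generalizing c p with
  | nil => simp at hp
  | cons x xs ih =>
    simp only [goA]
    by_cases hx : x = " "
    · by_cases htr : (if x = " " then c + 1 else c) > 5
      · rw [if_pos ⟨htr, hx⟩]
        have hc1 : c = 5 := by rw [if_pos hx] at htr; omega
        cases p with
        | zero => simp [hx, hc1]
        | succ q =>
          have hq : q < xs.length := by simpa using hp
          simp only [List.getElem?_cons_succ, List.getElem_cons_succ]
          rw [ih 0 (by omega) (by omega) q hq]
          have : ((x :: xs).take (q + 1 + 1)).count " "
              = 1 + ((xs.take (q + 1)).count " ") := by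
            simp [List.take_succ_cons, hx]; omega
          rw [this, hc1]
          push_cast
          have hiff : ∀ k : Int, ((5:Int) + (1 + k)) % 6 = 0 ↔ (0 + k) % 6 = 0 := by
            intro k; omega
          simp only [hiff]
      · rw [if_neg (by tauto)]
        have htr' : ¬ (c + 1 > 5) := by rw [if_pos hx] at htr; omega
        cases p with
        | zero =>
          simp only [List.getElem?_cons_zero, List.getElem_cons_zero]
          have : ((x :: xs).take 1).count " " = 1 := by simp [hx]
          rw [this]
          have : ¬ ((c + (1:Int)) % 6 = 0) := by omega
          simp [hx, this]
        | succ q =>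
          have hq : q < xs.length := by simpa using hp
          simp only [List.getElem?_cons_succ, List.getElem_cons_succ]
          rw [if_pos hx]
          rw [ih (c+1) (by omega) (by omega) q hq]
          have : ((x :: xs).take (q + 1 + 1)).count " "
              = 1 + ((xs.take (q + 1)).count " ") := by
            simp [List.take_succ_cons, hx]; omega
          rw [this]
          push_cast
          have hiff : ∀ k : Int, (c + (1 + k)) % 6 = 0 ↔ (c + 1 + k) % 6 = 0 := by
            intro k; omega
          simp only [hiff]
    · rw [if_neg (by tauto), if_neg hx]
      cases p with
      | zero => simp [hx]
      | succ q =>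
        have hq : q < xs.length := by simpa using hp
        simp only [List.getElem?_cons_succ, List.getElem_cons_succ]
        rw [ih c hc0 hc6 q hq]
        have : ((x :: xs).take (q + 1 + 1)).count " " = (xs.take (q + 1)).count " " := by
          simp [List.take_succ_cons, hx]
        rw [this]

-- B's fold of in-place sets, pointwise: a position gets '\n' iff some index in L maps to it.
theorem foldl_set_getElem? (g : Int → Int) (L : List Int) (ls : List String)
    (hg : ∀ j ∈ L, 0 ≤ g j) (p : Nat) :
    (L.foldl (fun acc j => PySem.List.pySetD acc (g j) "\n") ls)[p]? =
      if (∃ j ∈ L, g j = (p : Int)) ∧ p < ls.length then some "\n" else ls[p]? := by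
  induction L generalizing ls with
  | nil => simp
  | cons j L ihL =>
    have hgj := hg j (List.mem_cons_self ..)
    rw [List.foldl_cons, PySem.List.pySetD_of_nonneg _ _ hgj,
        ihL _ (fun j' hj' => hg j' (List.mem_cons_of_mem _ hj'))]
    rw [List.length_set, List.getElem?_set]
    by_cases hlen : p < ls.length
    · by_cases hmem : ∃ j' ∈ L, g j' = (p : Int)
      · simp [hmem, hlen]
      · by_cases heq : g j = (p : Int)
        · have ht : (g j).toNat = p := by omega
          simp [hmem, hlen, heq]
        · have ht : ¬ (g j).toNat = p := by omega
          simp [hmem, hlen, heq, ht]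
    · have hnone : ls[p]? = none := List.getElem?_eq_none (by omega)
      by_cases ht : (g j).toNat = p
      · simp [hlen, ht]
      · simp [hlen, ht]

theorem length_foldl_set (g : Int → Int) (L : List Int) (ls : List String) :
    (L.foldl (fun acc j => PySem.List.pySetD acc (g j) "\n") ls).length = ls.length := by
  induction L generalizing ls with
  | nil => rfl
  | cons j L ihL => rw [List.foldl_cons, ihL, PySem.List.length_pySetD]

-- The (j+1)-st collected space index (0-based j = number of spaces before position p)
-- is exactly s + p when ls[p] = " ".
theorem spacesFrom_of_space (ls : List String) (s : Int) (p : Nat) (hp : p < ls.length)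
    (hsp : ls[p] = " ") :
    PySem.List.pyGetD (spacesFrom s ls) (((ls.take p).count " " : Nat) : Int) 0 = s + p := by
  induction ls generalizing s p with
  | nil => simp at hp
  | cons x xs ih =>
    rw [spacesFrom_cons]
    cases p with
    | zero =>
      have hx : x = " " := hsp
      simp [hx, PySem.List.pyGetD_zero_cons]
    | succ q =>
      have hq : q < xs.length := by simpa using hp
      have hs : xs[q] = " " := by simpa using hsp
      by_cases hx : x = " "
      · have hcnt : ((x :: xs).take (q + 1)).count " " = ((xs.take q).count " ") + 1 := by
          simp [List.take_succ_cons, hx]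
        rw [hcnt, if_pos hx]
        have : ((((xs.take q).count " " + 1 : Nat)) : Int)
            = (((xs.take q).count " " : Nat) : Int) + 1 := by push_cast; ring
        rw [this]
        have hstep : PySem.List.pyGetD ([s] ++ spacesFrom (s + 1) xs)
            ((((xs.take q).count " " : Nat) : Int) + 1) 0
            = PySem.List.pyGetD (spacesFrom (s + 1) xs) (((xs.take q).count " " : Nat) : Int) 0 := by
          simp [PySem.List.pyGetD]
        rw [hstep, ih (s + 1) q hq hs]
        push_cast; ring
      · have hcnt : ((x :: xs).take (q + 1)).count " " = (xs.take q).count " " := by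
          simp [List.take_succ_cons, hx]
        rw [hcnt, if_neg hx, List.nil_append, ih (s + 1) q hq hs]
        push_cast; ring

-- Conversely, the j-th collected index names a space position whose prefix holds j spaces.
theorem spacesFrom_index (ls : List String) (s : Int) (j : Nat)
    (hj : j < (spacesFrom s ls).length) :
    ∃ p : Nat, p < ls.length ∧ ls[p]? = some " " ∧ (ls.take p).count " " = j ∧
      PySem.List.pyGetD (spacesFrom s ls) (j : Int) 0 = s + p := by
  induction ls generalizing s j with
  | nil => simp [spacesFrom] at hj
  | cons x xs ih =>
    rw [spacesFrom_cons] at hj ⊢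
    by_cases hx : x = " "
    · rw [if_pos hx] at hj ⊢
      cases j with
      | zero =>
        exact ⟨0, by simp, by simp [hx], by simp, by simp [PySem.List.pyGetD_zero_cons]⟩
      | succ k =>
        have hk : k < (spacesFrom (s + 1) xs).length := by simpa using hj
        obtain ⟨p, hp, hsp, hcnt, hget⟩ := ih (s + 1) k hk
        refine ⟨p + 1, by simpa using hp, by simpa using hsp, ?_, ?_⟩
        · simp [List.take_succ_cons, hx, hcnt]
        · have hstep : PySem.List.pyGetD ([s] ++ spacesFrom (s + 1) xs) ((k + 1 : Nat) : Int) 0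
              = PySem.List.pyGetD (spacesFrom (s + 1) xs) ((k : Nat) : Int) 0 := by
            push_cast
            simp [PySem.List.pyGetD]
          rw [hstep, hget]; push_cast; ring
    · rw [if_neg hx] at hj ⊢
      rw [List.nil_append] at hj ⊢
      obtain ⟨p, hp, hsp, hcnt, hget⟩ := ih (s + 1) j hj
      refine ⟨p + 1, by simpa using hp, by simpa using hsp, ?_, ?_⟩
      · simp [List.take_succ_cons, hx, hcnt]
      · rw [hget]; push_cast; ring

-- count of spaces in take (p+1) splits off position p
theorem count_take_succ (ls : List String) (p : Nat) (hp : p < ls.length) :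
    (ls.take (p + 1)).count " "
      = (ls.take p).count " " + (if ls[p] = " " then 1 else 0) := by
  have hsing : List.count " " [ls[p]] = if ls[p] = " " then 1 else 0 := by
    by_cases h : ls[p] = " " <;> simp [h]
  rw [List.take_add_one, List.getElem?_eq_getElem hp, Option.toList_some, List.count_append, hsing]

-- The stride-selected positions are exactly the spaces whose cumulative count is ≡ 0 mod 6.
theorem stride_hits (ls : List String) (p : Nat) (hp : p < ls.length) :
    ((∃ j ∈ PySem.List.pyRange 5 (((spacesFrom 0 ls).length : Nat) : Int) 6,
        PySem.List.pyGetD (spacesFrom 0 ls) j 0 = (p : Int)))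
      ↔ (ls[p] = " " ∧ ((0 : Int) + ((ls.take (p + 1)).count " " : Int)) % 6 = 0) := by
  constructor
  · rintro ⟨j, hjmem, hjval⟩
    rw [PySem.List.mem_pyRange_iff_of_pos (by norm_num)] at hjmem
    obtain ⟨hj5, hjm, hjd⟩ := hjmem
    have hj0 : 0 ≤ j := by omega
    have hjn : j.toNat < (spacesFrom 0 ls).length := by omega
    obtain ⟨q, hq, hsq, hcnt, hget⟩ := spacesFrom_index ls 0 j.toNat hjn
    have hjcast : ((j.toNat : Nat) : Int) = j := by omega
    rw [hjcast] at hget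
    have hpq : (p : Int) = (q : Int) := by rw [hget] at hjval; omega
    have hpq' : p = q := by omega
    subst hpq'
    have hsp : ls[p] = " " := by
      have := List.getElem?_eq_getElem hp ▸ hsq; simpa using this
    refine ⟨hsp, ?_⟩
    rw [count_take_succ ls p hp, if_pos hsp, hcnt]
    obtain ⟨t, ht⟩ := hjd
    push_cast
    omega
  · rintro ⟨hsp, hmod⟩
    set k := (ls.take p).count " " with hk
    have hcnt : (ls.take (p + 1)).count " " = k + 1 := by
      rw [count_take_succ ls p hp, if_pos hsp]
    rw [hcnt] at hmod
    have hklen : k < (spacesFrom 0 ls).length := by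
      rw [length_spacesFrom]
      have h1 : (ls.take (p + 1)).count " " ≤ ls.count " " := by
        conv_rhs => rw [← List.take_append_drop (p + 1) ls]
        rw [List.count_append]; omega
      omega
    refine ⟨(k : Int), ?_, ?_⟩
    · rw [PySem.List.mem_pyRange_iff_of_pos (by norm_num)]
      refine ⟨by omega, by exact_mod_cast hklen, by omega⟩
    · rw [spacesFrom_of_space ls 0 p hp hsp]
      omega

-- The two result lists coincide.
theorem lists_eq (ls : List String) :
    goA 0 ls
      = (PySem.List.pyRange 5 (((spacesFrom 0 ls).length : Nat) : Int) 6).foldl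
          (fun acc j => PySem.List.pySetD acc (PySem.List.pyGetD (spacesFrom 0 ls) j 0) "\n") ls := by
  have hg : ∀ j ∈ PySem.List.pyRange 5 (((spacesFrom 0 ls).length : Nat) : Int) 6,
      0 ≤ PySem.List.pyGetD (spacesFrom 0 ls) j 0 := by
    intro j hj
    rw [PySem.List.mem_pyRange_iff_of_pos (by norm_num)] at hj
    obtain ⟨hj5, hjm, -⟩ := hj
    have hjn : j.toNat < (spacesFrom 0 ls).length := by omega
    obtain ⟨q, hq, -, -, hget⟩ := spacesFrom_index ls 0 j.toNat hjn
    have hjcast : ((j.toNat : Nat) : Int) = j := by omega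
    rw [hjcast] at hget
    rw [hget]; omega
  apply List.ext_getElem?
  intro p
  by_cases hp : p < ls.length
  · rw [goA_getElem? ls 0 (by norm_num) (by norm_num) p hp,
      foldl_set_getElem? _ _ _ hg p]
    simp only [stride_hits ls p hp]
    by_cases hcond : ls[p] = " " ∧ ((0:Int) + ((ls.take (p + 1)).count " " : Int)) % 6 = 0
    · simp [hcond, hp, apply_ite some]
    · simp [hp, apply_ite some]
  · rw [List.getElem?_eq_none (by rw [length_goA]; omega),
      List.getElem?_eq_none (by rw [length_foldl_set _ _ ls]; omega)]

-- ===== VERDICT (by name: the statement is the Claim_ definition above) =====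
theorem add_newline_spec : Claim_equal_add_newline := by
  intro lyrics _
  show add_newline lyrics = add_newline_alt lyrics
  unfold add_newline add_newline_alt
  have hA := loopA lyrics [] 0
  simp only [List.length_nil, Nat.cast_zero, zero_add, List.nil_append] at hA
  rw [hA]
  congr 1
  exact lists_eq lyrics
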